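-- pv_equiv track=rewrite | github.com/NBISweden/libpredweb | libpredweb/myfunc.py | GetFirstWord1
-- ===== SOURCE A (Python) =====
-- def GetFirstWord1(buff, delimiter = " \t\r,.\n"):#{{{
-- # this version is only slightly faster when the length of first word is short,
-- # e.g. < 6 chars and when the delimiter is long. It is suitable for getting
-- # firstword of an natual language article.
--     if buff:
--         firstword = ""
--         for i in range(len(buff)):
--             if delimiter.find(buff[i]) < 0:
--                 firstword += buff[i]
--             else:
--                 break
--         return firstword
--     else:
--         return ""
-- ===== SOURCE B (Python) =====
-- def GetFirstWord1(buff, delimiter = " \t\r,.\n"):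
--     if not buff:
--         return ""
--     positions = [p for p in (buff.find(d) for d in delimiter) if p >= 0]
--     if positions:
--         return buff[:min(positions)]
--     return buff
-- ===== Notes on version B (the rewrite author's own statement) =====
-- stated objective: alternative
-- what changed: Replaces the early-exit character-by-character scan that accumulates the word with a per-delimiter buff.find pass whose non-negative first-occurrence indices are combined by min, slicing buff at that index.
import Mathlib
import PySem

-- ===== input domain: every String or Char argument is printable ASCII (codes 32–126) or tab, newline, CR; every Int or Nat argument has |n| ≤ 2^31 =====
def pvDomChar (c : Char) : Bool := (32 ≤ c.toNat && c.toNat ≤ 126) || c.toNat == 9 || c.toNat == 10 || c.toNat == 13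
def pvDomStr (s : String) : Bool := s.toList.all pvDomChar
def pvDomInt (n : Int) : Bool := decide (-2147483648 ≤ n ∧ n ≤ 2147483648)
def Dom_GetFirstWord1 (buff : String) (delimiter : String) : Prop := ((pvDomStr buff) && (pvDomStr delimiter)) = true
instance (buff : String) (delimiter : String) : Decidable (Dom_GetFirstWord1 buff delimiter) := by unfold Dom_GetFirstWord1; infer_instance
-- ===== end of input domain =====

-- B replaces A's early-exit per-character accumulating scan by per-delimiter first-occurrence searches combined by min (alternative decomposition, same result).

-- ===== PORT A =====
-- the for-loop over range(len(buff)) with `break`: recursion over the remaining characters, accumulating firstword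
def GetFirstWord1.go (ds : List Char) (acc : List Char) : List Char → List Char
  | [] => acc
  | c :: rest =>
      if PySem.Chars.find ds [c] < 0 then GetFirstWord1.go ds (acc ++ [c]) rest
      else acc

def GetFirstWord1 (buff : String) (delimiter : String) : String :=
  if buff ≠ "" then String.ofList (GetFirstWord1.go delimiter.toList [] buff.toList)
  else ""

-- ===== PORT B =====
def GetFirstWord1_alt (buff : String) (delimiter : String) : String :=
  if buff = "" then ""
  else
    let positions :=
      (delimiter.toList.map (fun d => PySem.Str.find buff (String.ofList [d]))).filter
        (fun p => decide (0 ≤ p))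
    match PySem.List.min? positions (fun x => x) with
    | some m => PySem.Str.slice buff none (some m)
    | none => buff

-- ===== PRECONDITION & SPEC =====
def Spec_GetFirstWord1 (buff : String) (delimiter : String) (out : String) : Prop := out = GetFirstWord1_alt buff delimiter
instance (buff : String) (delimiter : String) (out : String) : Decidable (Spec_GetFirstWord1 buff delimiter out) := by unfold Spec_GetFirstWord1; infer_instance

-- ===== CLAIM (what is proved, stated in full; the proofs are below) =====
def Claim_equal_GetFirstWord1 : Prop := ∀ (buff : String) (delimiter : String), Dom_GetFirstWord1 buff delimiter → Spec_GetFirstWord1 buff delimiter (GetFirstWord1 buff delimiter)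

-- ===== LEMMAS AND PROOFS =====

theorem pv_singleton_prefix {d : Char} {m : List Char} : [d] <+: m ↔ m.head? = some d := by
  constructor
  · rintro ⟨t, rfl⟩; rfl
  · intro h
    cases m with
    | nil => simp at h
    | cons a t => simp at h; subst h; exact ⟨t, rfl⟩

theorem pv_singleton_prefix_drop {l : List Char} {d : Char} {j : Nat} :
    [d] <+: l.drop j ↔ l[j]? = some d := by
  rw [pv_singleton_prefix, List.head?_drop]

theorem pv_find_single_neg {c : Char} {ds : List Char} :
    PySem.Chars.find ds [c] < 0 ↔ c ∉ ds := by
  have h1 := PySem.Chars.neg_one_le_find (s := ds) (sub := [c])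
  have h2 := PySem.Chars.find_eq_neg_one_iff (s := ds) (sub := [c])
  rw [List.singleton_infix_iff] at h2
  constructor
  · intro h; exact h2.mp (by omega)
  · intro h; have := h2.mpr h; omega

theorem pv_goA (ds : List Char) (l : List Char) : ∀ acc : List Char,
    GetFirstWord1.go ds acc l = acc ++ l.takeWhile (fun c => !(ds.contains c)) := by
  induction l with
  | nil => intro acc; simp [GetFirstWord1.go]
  | cons c rest ih =>
      intro acc
      by_cases h : c ∈ ds
      · have hf : ¬ PySem.Chars.find ds [c] < 0 := by
          rw [pv_find_single_neg]; simp [h]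
        simp [GetFirstWord1.go, hf, h]
      · have hf : PySem.Chars.find ds [c] < 0 := pv_find_single_neg.mpr h
        simp [GetFirstWord1.go, hf, ih, h]

-- characters strictly before the takeWhile boundary satisfy the predicate
theorem pv_tw_lt (p : Char → Bool) (l : List Char) (i : Nat)
    (h : i < (l.takeWhile p).length) : ∃ c, l[i]? = some c ∧ p c = true := by
  obtain ⟨t, ht⟩ := List.takeWhile_prefix (l := l) p
  refine ⟨(l.takeWhile p)[i], ?_, List.mem_takeWhile_imp (List.getElem_mem h)⟩
  conv_lhs => rw [← ht]
  rw [List.getElem?_append_left h, List.getElem?_eq_getElem h]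

-- the character at the takeWhile boundary (when it exists) fails the predicate
theorem pv_tw_stop (p : Char → Bool) : ∀ l : List Char,
    (l.takeWhile p).length < l.length →
    ∃ c, l[(l.takeWhile p).length]? = some c ∧ p c = false := by
  intro l
  induction l with
  | nil => simp
  | cons a rest ih =>
      intro h
      cases hp : p a with
      | false => exact ⟨a, by simp [hp], hp⟩
      | true =>
          simp only [List.takeWhile_cons, hp, if_true, List.length_cons] at h ⊢
          obtain ⟨c, hc, hpc⟩ := ih (by omega)
          exact ⟨c, by simpa using hc, hpc⟩

-- first occurrence of d ∈ ds in l is at least the takeWhile boundary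
theorem pv_find_ge {l ds : List Char} {d : Char} (hd : d ∈ ds)
    (h0 : 0 ≤ PySem.Chars.find l [d]) :
    ((l.takeWhile (fun c => !(ds.contains c))).length : Int) ≤ PySem.Chars.find l [d] := by
  by_contra hlt
  push Not at hlt
  obtain ⟨hpre, _⟩ := PySem.Chars.find_spec (s := l) (sub := [d]) h0
  rw [pv_singleton_prefix_drop] at hpre
  have hi : (PySem.Chars.find l [d]).toNat < (l.takeWhile (fun c => !(ds.contains c))).length := by
    omega
  obtain ⟨c, hc, hpc⟩ := pv_tw_lt _ l _ hi
  rw [hpre] at hc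
  cases hc
  simp [hd] at hpc

-- the char right at the boundary is a delimiter found exactly there
theorem pv_find_at_k {l ds : List Char}
    (hk : (l.takeWhile (fun c => !(ds.contains c))).length < l.length) :
    ∃ d ∈ ds, PySem.Chars.find l [d] = ((l.takeWhile (fun c => !(ds.contains c))).length : Int) := by
  obtain ⟨c, hc, hpc⟩ := pv_tw_stop _ l hk
  have hcds : c ∈ ds := by simpa using hpc
  refine ⟨c, hcds, ?_⟩
  have hmem : c ∈ l := List.mem_of_getElem? hc
  have h0 : 0 ≤ PySem.Chars.find l [c] := by
    rw [PySem.Chars.find_nonneg_iff, List.singleton_infix_iff]; exact hmem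
  obtain ⟨hpre, hmin⟩ := PySem.Chars.find_spec (s := l) (sub := [c]) h0
  rw [pv_singleton_prefix_drop] at hpre
  set k := (l.takeWhile (fun c => !(ds.contains c))).length with hkdef
  rcases lt_trichotomy (PySem.Chars.find l [c]).toNat k with h | h | h
  · obtain ⟨c', hc', hpc'⟩ := pv_tw_lt _ l _ h
    rw [hpre] at hc'
    cases hc'
    simp [hcds] at hpc'
  · omega
  · exact absurd (hmin k h (pv_singleton_prefix_drop.mpr hc)) (fun x => x)

-- no delimiter char occurs in l when the takeWhile boundary is the whole list
theorem pv_find_none {l ds : List Char}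
    (hk : (l.takeWhile (fun c => !(ds.contains c))).length = l.length) :
    ∀ d ∈ ds, PySem.Chars.find l [d] = -1 := by
  intro d hd
  have htw : l.takeWhile (fun c => !(ds.contains c)) = l :=
    List.IsPrefix.eq_of_length (List.takeWhile_prefix _) hk
  rw [PySem.Chars.find_eq_neg_one_iff, List.singleton_infix_iff]
  intro hdl
  have := List.mem_takeWhile_imp (htw ▸ hdl)
  simp [hd] at this

-- ===== VERDICT (by name: the statement is the Claim_ definition above) =====
theorem GetFirstWord1_spec : Claim_equal_GetFirstWord1 := by
  intro buff delimiter _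
  unfold Spec_GetFirstWord1 GetFirstWord1 GetFirstWord1_alt
  by_cases hb : buff = ""
  · simp [hb]
  · simp only [hb, ne_eq, not_false_eq_true, if_true, if_false]
    set l := buff.toList with hl
    set ds := delimiter.toList with hds
    set p : Char → Bool := fun c => !(ds.contains c) with hp
    rw [pv_goA]
    simp only [List.nil_append]
    set k := (l.takeWhile p).length with hk
    set positions :=
      ((ds.map (fun d => PySem.Str.find buff (String.ofList [d]))).filter
        (fun q => decide (0 ≤ q))) with hpos
    have hfind : ∀ d, PySem.Str.find buff (String.ofList [d]) = PySem.Chars.find l [d] := by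
      intro d; simp [← hl]
    have hklen : k ≤ l.length := by
      simpa using (List.IsPrefix.length_le (List.takeWhile_prefix (l := l) p))
    rcases lt_or_eq_of_le hklen with hlt | heq
    · -- some delimiter occurs: min? = some k, slice = takeWhile
      obtain ⟨d0, hd0, hfd0⟩ := pv_find_at_k (ds := ds) hlt
      have hkmem : ((k : Int)) ∈ positions := by
        rw [hpos]
        refine List.mem_filter.mpr ⟨List.mem_map.mpr ⟨d0, hd0, ?_⟩, by simp⟩
        rw [hfind]; exact hfd0
      have hlb : ∀ x ∈ positions, (k : Int) ≤ x := by
        intro x hx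
        rw [hpos] at hx
        obtain ⟨hxm, hx0⟩ := List.mem_filter.mp hx
        obtain ⟨d, hd, hfd⟩ := List.mem_map.mp hxm
        rw [hfind] at hfd
        subst hfd
        exact pv_find_ge hd (by simpa using hx0)
      have hmin : PySem.List.min? positions (fun x => x) = some ((k : Int)) := by
        cases hm : PySem.List.min? positions (fun x => x) with
        | none =>
            rw [PySem.List.min?_eq_none_iff] at hm
            rw [hm] at hkmem; simp at hkmem
        | some m =>
            have h1 : m ∈ positions := PySem.List.min?_mem hm
            have h2 := PySem.List.min?_isMin hm ((k : Int)) hkmem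
            have h3 := hlb m h1
            have : m = (k : Int) := le_antisymm h2 h3
            rw [this]
      rw [hmin]
      have hslice : (PySem.Str.slice buff none (some ((k : Int)))).toList = l.take k := by
        simp [← hl, PySem.List.slice_to_natCast]
      have htake : l.take k = l.takeWhile p := by
        have := (List.prefix_iff_eq_take.mp (List.takeWhile_prefix (l := l) p))
        rw [← hk] at this
        exact this.symm
      calc String.ofList (l.takeWhile p)
          = String.ofList ((PySem.Str.slice buff none (some ((k : Int)))).toList) := by
            rw [hslice, htake]
        _ = PySem.Str.slice buff none (some ((k : Int))) := String.ofList_toList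
    · -- no delimiter occurs: positions = [], result is buff itself
      have hnil : positions = [] := by
        rw [hpos, List.filter_eq_nil_iff]
        intro x hx
        obtain ⟨d, hd, hfd⟩ := List.mem_map.mp hx
        rw [hfind] at hfd
        have := pv_find_none (ds := ds) heq d hd
        subst hfd
        simp [this]
      have hmin : PySem.List.min? positions (fun x => x) = none := by
        rw [PySem.List.min?_eq_none_iff]; exact hnil
      rw [hmin]
      have htw : l.takeWhile p = l :=
        List.IsPrefix.eq_of_length (List.takeWhile_prefix _) heq
      rw [htw, hl, String.ofList_toList]
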